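-- pv_equiv track=rewrite | github.com/aaronlerch/cave-talk | src/cave_talk/wake.py | _word_similar
-- ===== SOURCE A (Python) =====
-- def _word_similar(a: str, b: str) -> bool:
--     """Check if two words are similar enough (exact match or edit distance <= 1)."""
--     if a == b:
--         return True
--     if abs(len(a) - len(b)) > 1:
--         return False
--     if len(a) == len(b):
--         return sum(ca != cb for ca, cb in zip(a, b)) <= 1
--     short, long = (a, b) if len(a) < len(b) else (b, a)
--     diffs = 0
--     si = li = 0
--     while si < len(short) and li < len(long):
--         if short[si] != long[li]:
--             diffs += 1
--             li += 1
--         else: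
--             si += 1
--             li += 1
--     return diffs <= 1
-- ===== SOURCE B (Python) =====
-- def _word_similar(a: str, b: str) -> bool:
--     """Similar iff edit distance <= 1: strip the longest common prefix, then the
--     rest must match after dropping at most one leading char from one (or both) sides."""
--     i = 0
--     while i < len(a) and i < len(b) and a[i] == b[i]:
--         i += 1
--     ta, tb = a[i:], b[i:]
--     if ta == tb:
--         return True
--     return ta[1:] == tb[1:] or ta[1:] == tb or ta == tb[1:]
-- ===== Notes on version B (the rewrite author's own statement) =====
-- stated objective: simpler
-- what changed: Replaced A's three special-cased branches (exact match, length gap, Hamming sum over zip, greedy two-pointer skip loop with a diff counter) by a single strategy: strip the longest common prefix, then the edit distance is <= 1 iff the remainders agree after dropping at most one leading character from either side.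
import Mathlib
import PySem

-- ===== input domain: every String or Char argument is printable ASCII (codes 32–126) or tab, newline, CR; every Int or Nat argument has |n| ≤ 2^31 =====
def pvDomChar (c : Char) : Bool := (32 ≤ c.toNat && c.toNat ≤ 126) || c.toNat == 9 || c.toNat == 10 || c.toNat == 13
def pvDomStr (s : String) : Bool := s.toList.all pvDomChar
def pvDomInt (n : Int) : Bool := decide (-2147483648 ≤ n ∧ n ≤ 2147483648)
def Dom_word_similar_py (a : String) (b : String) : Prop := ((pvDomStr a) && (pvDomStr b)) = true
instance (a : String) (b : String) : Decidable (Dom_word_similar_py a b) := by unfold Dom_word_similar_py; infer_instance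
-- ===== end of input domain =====

-- B replaces A's three special-cased branches and greedy two-pointer loop by one uniform rule
-- (strip the longest common prefix, then compare the tails after dropping at most one leading
-- char); same return value everywhere, chosen for simplicity, not speed.

-- ===== PORT A =====
-- A's while loop (two pointers si/li over short/long, counting diffs, skipping one char of
-- long on a mismatch), as an index recursion; the loop guard keeps every read in range, so
-- getD is exact for Python's short[si]/long[li].
def wsLoop (short long : List Char) (diffs si li : Nat) : Nat :=
  if h : si < short.length ∧ li < long.length then
    if short.getD si ' ' ≠ long.getD li ' ' then
      wsLoop short long (diffs + 1) si (li + 1)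
    else
      wsLoop short long diffs (si + 1) (li + 1)
  else diffs
termination_by long.length - li
decreasing_by all_goals omega

def word_similar_py (a : String) (b : String) : Bool :=
  let la := a.toList
  let lb := b.toList
  if la = lb then true
  else if ((la.length : Int) - (lb.length : Int)).natAbs > 1 then false
  else if la.length = lb.length then
    decide ((la.zip lb).foldl (fun acc p => acc + (if p.1 ≠ p.2 then 1 else 0)) 0 ≤ 1)
  else
    let sl := if la.length < lb.length then (la, lb) else (lb, la)
    decide (wsLoop sl.1 sl.2 0 0 0 ≤ 1)

-- ===== PORT B =====
-- Source B's while loop computing the common-prefix length, as an index recursion (getD exact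
-- under the loop guard); a[i:] with 0 ≤ i is List.drop i, ta[1:] is List.drop 1.
def cplLoop (a b : List Char) (i : Nat) : Nat :=
  if h : i < a.length ∧ i < b.length ∧ a.getD i ' ' = b.getD i ' ' then
    cplLoop a b (i + 1)
  else i
termination_by a.length - i
decreasing_by omega

def word_similar_py_alt (a : String) (b : String) : Bool :=
  let la := a.toList
  let lb := b.toList
  let i := cplLoop la lb 0
  let ta := la.drop i
  let tb := lb.drop i
  if ta = tb then true
  else (decide (ta.drop 1 = tb.drop 1) || decide (ta.drop 1 = tb) || decide (ta = tb.drop 1))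

-- ===== PRECONDITION & SPEC =====
def Spec_word_similar_py (a : String) (b : String) (out : Bool) : Prop := out = word_similar_py_alt a b
instance (a : String) (b : String) (out : Bool) : Decidable (Spec_word_similar_py a b out) := by unfold Spec_word_similar_py; infer_instance

-- ===== CLAIM (what is proved, stated in full; the proofs are below) =====
def Claim_equal_word_similar_py : Prop := ∀ (a : String) (b : String), Dom_word_similar_py a b → Spec_word_similar_py a b (word_similar_py a b)

-- ===== LEMMAS AND PROOFS =====

-- structural recursions mirroring the three loops/folds of the two ports
def gdiffs : List Char → List Char → Nat
  | _, [] => 0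
  | [], _ => 0
  | x :: s, y :: l => if x = y then gdiffs s l else 1 + gdiffs (x :: s) l

def cpl : List Char → List Char → Nat
  | x :: s, y :: l => if x = y then cpl s l + 1 else 0
  | _, _ => 0

def ham : List Char → List Char → Nat
  | x :: s, y :: l => (if x = y then 0 else 1) + ham s l
  | _, _ => 0

theorem drop_cons (l : List Char) (i : Nat) (h : i < l.length) :
    l.drop i = l.getD i ' ' :: l.drop (i+1) := by
  rw [List.drop_eq_getElem_cons h, List.getD_eq_getElem l ' ' h]

theorem wsLoop_eq_gdiffs (short long : List Char) :
    ∀ diffs si li, wsLoop short long diffs si li = diffs + gdiffs (short.drop si) (long.drop li) := by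
  intro diffs si li
  fun_induction wsLoop short long diffs si li with
  | case1 diffs si li h hne ih =>
    rw [ih, drop_cons short si h.1, drop_cons long li h.2]
    simp only [gdiffs, if_neg hne]
    omega
  | case2 diffs si li h heq ih =>
    rw [ih, drop_cons short si h.1, drop_cons long li h.2]
    simp only [not_not] at heq
    simp only [gdiffs, if_pos heq]
  | case3 diffs si li h =>
    rw [not_and] at h
    rcases Nat.lt_or_ge si short.length with hs | hs
    · have hl : long.length ≤ li := Nat.le_of_not_lt (h hs)
      rw [List.drop_eq_nil_of_le hl]
      cases short.drop si <;> simp [gdiffs]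
    · rw [List.drop_eq_nil_of_le hs]
      cases long.drop li <;> simp [gdiffs]

theorem cplLoop_eq_cpl (a b : List Char) :
    ∀ i, cplLoop a b i = i + cpl (a.drop i) (b.drop i) := by
  intro i
  fun_induction cplLoop a b i with
  | case1 i h ih =>
    rw [ih, drop_cons a i h.1, drop_cons b i h.2.1]
    simp only [cpl, if_pos h.2.2]
    omega
  | case2 i h =>
    rcases Nat.lt_or_ge i a.length with ha | ha
    · rcases Nat.lt_or_ge i b.length with hb | hb
      · have hne : ¬ a.getD i ' ' = b.getD i ' ' := fun hc => h ⟨ha, hb, hc⟩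
        rw [drop_cons a i ha, drop_cons b i hb]
        simp only [cpl]
        rw [if_neg hne]
        omega
      · rw [List.drop_eq_nil_of_le hb]
        cases a.drop i <;> simp [cpl]
    · rw [List.drop_eq_nil_of_le ha]
      cases b.drop i <;> simp [cpl]

theorem foldl_eq_ham (a b : List Char) :
    ∀ d, (a.zip b).foldl (fun acc p => acc + (if p.1 ≠ p.2 then 1 else 0)) d = d + ham a b := by
  induction a generalizing b with
  | nil => intro d; cases b <;> simp [ham]
  | cons x s ih =>
    intro d
    cases b with
    | nil => simp [ham]
    | cons y l =>
      simp only [List.zip_cons_cons, List.foldl_cons, ham, ih]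
      by_cases hxy : x = y <;> simp [hxy] <;> omega

theorem cpl_comm (a b : List Char) : cpl a b = cpl b a := by
  induction a generalizing b with
  | nil => cases b <;> simp [cpl]
  | cons x s ih =>
    cases b with
    | nil => simp [cpl]
    | cons y l =>
      simp only [cpl]
      by_cases hxy : x = y
      · simp [hxy, ih]
      · rw [if_neg hxy, if_neg (fun hyx => hxy hyx.symm)]

theorem cpl_le_left (a b : List Char) : cpl a b ≤ a.length := by
  induction a generalizing b with
  | nil => cases b <;> simp [cpl]
  | cons x s ih =>
    cases b with
    | nil => simp [cpl]
    | cons y l =>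
      simp only [cpl]
      by_cases hxy : x = y <;> simp [hxy]
      exact ih l

theorem cpl_le_right (a b : List Char) : cpl a b ≤ b.length := by
  rw [cpl_comm]; exact cpl_le_left b a

theorem take_cpl_eq (a b : List Char) : a.take (cpl a b) = b.take (cpl a b) := by
  induction a generalizing b with
  | nil => cases b <;> simp [cpl]
  | cons x s ih =>
    cases b with
    | nil => simp [cpl]
    | cons y l =>
      simp only [cpl]
      by_cases hxy : x = y <;> simp [hxy, ih]

theorem eq_of_drop_cpl_eq (a b : List Char) (h : a.drop (cpl a b) = b.drop (cpl a b)) : a = b := by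
  calc a = a.take (cpl a b) ++ a.drop (cpl a b) := (List.take_append_drop _ a).symm
    _ = b.take (cpl a b) ++ b.drop (cpl a b) := by rw [take_cpl_eq a b, h]
    _ = b := List.take_append_drop _ b

theorem ham_zero_iff (a : List Char) : ∀ b, a.length = b.length → (ham a b = 0 ↔ a = b) := by
  induction a with
  | nil => intro b h; cases b <;> simp_all [ham]
  | cons x s ih =>
    intro b h
    cases b with
    | nil => simp at h
    | cons y l =>
      simp only [List.length_cons] at h
      by_cases hxy : x = y
      · simp [ham, hxy, ih l (by omega)]
      · simp [ham, hxy]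

theorem gdiffs_zero_iff (a : List Char) : ∀ b, a.length = b.length → (gdiffs a b = 0 ↔ a = b) := by
  induction a with
  | nil => intro b h; cases b <;> simp_all [gdiffs]
  | cons x s ih =>
    intro b h
    cases b with
    | nil => simp at h
    | cons y l =>
      simp only [List.length_cons] at h
      by_cases hxy : x = y
      · simp [gdiffs, hxy, ih l (by omega)]
      · simp [gdiffs, hxy]

theorem ham_le_one_iff (a : List Char) : ∀ b, a.length = b.length →
    (ham a b ≤ 1 ↔ (a.drop (cpl a b)).drop 1 = (b.drop (cpl a b)).drop 1) := by
  induction a with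
  | nil => intro b h; cases b <;> simp_all [ham, cpl]
  | cons x s ih =>
    intro b h
    cases b with
    | nil => simp at h
    | cons y l =>
      simp only [List.length_cons] at h
      by_cases hxy : x = y
      · simpa [ham, cpl, hxy] using ih l (by omega)
      · simp only [ham, cpl, if_neg hxy, List.drop_zero, List.drop_one, List.tail_cons]
        constructor
        · intro hle
          exact (ham_zero_iff s l (by omega)).1 (by omega)
        · intro hsl
          have := (ham_zero_iff s l (by omega)).2 hsl
          omega

theorem gdiffs_le_one_iff (s : List Char) : ∀ l, s.length + 1 = l.length →
    (gdiffs s l ≤ 1 ↔ s.drop (cpl s l) = (l.drop (cpl s l)).drop 1) := by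
  induction s with
  | nil =>
    intro l h
    cases l with
    | nil => simp at h
    | cons y l' =>
      simp only [List.length_cons, List.length_nil] at h
      have hl : l'.length = 0 := by omega
      have : l' = [] := List.length_eq_zero_iff.mp hl
      subst this
      simp [gdiffs, cpl]
  | cons x s' ih =>
    intro l h
    cases l with
    | nil => simp at h
    | cons y l' =>
      simp only [List.length_cons] at h
      by_cases hxy : x = y
      · simpa [gdiffs, cpl, hxy] using ih l' (by omega)
      · simp only [gdiffs, cpl, if_neg hxy, List.drop_zero, List.drop_one, List.tail_cons]
        constructor
        · intro hle
          exact (gdiffs_zero_iff (x :: s') l' (by simp; omega)).1 (by omega)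
        · intro hsl
          have := (gdiffs_zero_iff (x :: s') l' (by simp; omega)).2 hsl
          omega

theorem main_eq (a b : String) : word_similar_py a b = word_similar_py_alt a b := by
  unfold word_similar_py word_similar_py_alt
  simp only [cplLoop_eq_cpl, List.drop_zero, Nat.zero_add]
  set la := a.toList with hla
  set lb := b.toList with hlb
  set k := cpl la lb with hk
  have hkl : k ≤ la.length := cpl_le_left la lb
  have hkr : k ≤ lb.length := cpl_le_right la lb
  have hlta : (la.drop k).length = la.length - k := List.length_drop
  have hltb : (lb.drop k).length = lb.length - k := List.length_drop
  have hlta1 : ((la.drop k).drop 1).length = la.length - k - 1 := by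
    rw [List.length_drop, hlta]
  have hltb1 : ((lb.drop k).drop 1).length = lb.length - k - 1 := by
    rw [List.length_drop, hltb]
  by_cases heq : la = lb
  · have h2 : la.drop k = lb.drop k := by rw [heq]
    rw [if_pos heq, if_pos h2]
  · rw [if_neg heq]
    have hne : ¬ la.drop k = lb.drop k := fun h => heq (eq_of_drop_cpl_eq la lb h)
    have hlne : ¬ (la.length = lb.length ∧ k = la.length) := by
      rintro ⟨h1, h2⟩
      apply hne
      rw [List.drop_eq_nil_of_le (le_of_eq h2.symm), List.drop_eq_nil_of_le (by omega)]
    rw [if_neg hne, ← Bool.decide_or, ← Bool.decide_or]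
    by_cases hgap : ((la.length : Int) - (lb.length : Int)).natAbs > 1
    · -- length gap ≥ 2: every disjunct fails by length
      have hg2 : la.length + 2 ≤ lb.length ∨ lb.length + 2 ≤ la.length := by omega
      rw [if_pos hgap]
      symm
      rw [decide_eq_false_iff_not]
      rintro ((h | h) | h) <;>
        · have := congrArg List.length h
          omega
    · rw [if_neg hgap]
      by_cases hlen : la.length = lb.length
      · -- equal length: A decides ham ≤ 1, only the first disjunct can hold
        rw [if_pos hlen, foldl_eq_ham la lb 0]
        simp only [Nat.zero_add]
        rw [decide_eq_decide]
        have key := ham_le_one_iff la lb hlen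
        constructor
        · intro h; exact Or.inl (Or.inl (key.mp h))
        · rintro ((h | h) | h)
          · exact key.mpr h
          · exact absurd (congrArg List.length h) (by intro hc; omega)
          · exact absurd (congrArg List.length h) (by intro hc; omega)
      · rw [if_neg hlen]
        by_cases hlt : la.length < lb.length
        · -- lb longer by exactly 1: A runs the greedy loop on (la, lb)
          have h1 : la.length + 1 = lb.length := by omega
          rw [if_pos hlt]
          rw [wsLoop_eq_gdiffs la lb 0 0 0]
          simp only [List.drop_zero, Nat.zero_add]
          rw [decide_eq_decide]
          have key := gdiffs_le_one_iff la lb h1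
          constructor
          · intro h; exact Or.inr (key.mp h)
          · rintro ((h | h) | h)
            · -- drop-1s equal: forces la.drop k = [] and reduces to the third disjunct
              have hc := congrArg List.length h
              have hta : la.drop k = [] := List.length_eq_zero_iff.mp (by omega)
              apply key.mpr
              rw [hta] at h ⊢
              simpa using h
            · exact absurd (congrArg List.length h) (by intro hc; omega)
            · exact key.mpr h
        · -- la longer by exactly 1: A runs the greedy loop on (lb, la)
          have h1 : lb.length + 1 = la.length := by omega
          rw [if_neg hlt]
          rw [wsLoop_eq_gdiffs lb la 0 0 0]
          simp only [List.drop_zero, Nat.zero_add]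
          rw [decide_eq_decide]
          have hk2 : cpl lb la = k := by rw [hk]; exact cpl_comm lb la
          have key := gdiffs_le_one_iff lb la h1
          rw [hk2] at key
          constructor
          · intro h; exact Or.inl (Or.inr (key.mp h).symm)
          · rintro ((h | h) | h)
            · -- drop-1s equal: forces lb.drop k = [] and reduces to the second disjunct
              have hc := congrArg List.length h
              have htb : lb.drop k = [] := List.length_eq_zero_iff.mp (by omega)
              apply key.mpr
              rw [htb] at h ⊢
              simpa using h.symm
            · exact key.mpr h.symm
            · exact absurd (congrArg List.length h) (by intro hc; omega)

-- ===== VERDICT (by name: the statement is the Claim_ definition above) =====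
theorem word_similar_py_spec : Claim_equal_word_similar_py := by
  intro a b _
  unfold Spec_word_similar_py
  exact main_eq a b
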